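-- pv_equiv track=rewrite | github.com/ofer1992/ofer1992.github.io | obsidian_markdown.py | _style_mentions
-- ===== SOURCE A (Python) =====
-- def _style_mentions(style: str | None, prop: str) -> bool:
--     if not style:
--         return False
--     prop = prop.lower()
--     for chunk in style.split(";"):
--         if chunk.strip().lower().startswith(prop):
--             return True
--     return False
-- ===== SOURCE B (Python) =====
-- def _style_mentions(style, prop):
--     if not style:
--         return False
--     p = prop.lower()
--     chunk = ""
--     for ch in style:
--         if ch == ";":
--             if chunk.strip().startswith(p):
--                 return True
--             chunk = ""
--         else:
--             chunk += ch.lower()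
--     return chunk.strip().startswith(p)
-- ===== Notes on version B (the rewrite author's own statement) =====
-- stated objective: alternative
-- what changed: Replaces split(';') plus per-chunk strip/lower/startswith with a single character-level pass that lowercases as it goes, accumulates the current chunk and tests it at each ';' boundary, never building the list of chunks.
import Mathlib
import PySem

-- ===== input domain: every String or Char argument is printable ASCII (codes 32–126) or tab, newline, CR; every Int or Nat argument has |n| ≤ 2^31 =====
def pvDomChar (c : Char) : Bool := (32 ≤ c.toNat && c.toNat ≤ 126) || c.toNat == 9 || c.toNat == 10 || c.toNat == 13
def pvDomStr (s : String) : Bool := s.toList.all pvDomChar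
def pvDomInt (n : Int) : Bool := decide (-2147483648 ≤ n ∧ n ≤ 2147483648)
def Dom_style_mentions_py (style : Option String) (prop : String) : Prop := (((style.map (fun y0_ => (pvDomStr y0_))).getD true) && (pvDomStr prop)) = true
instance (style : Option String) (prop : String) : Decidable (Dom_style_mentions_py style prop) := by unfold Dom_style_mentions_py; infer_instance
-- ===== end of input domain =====

-- B replaces split(";") + per-chunk strip/lower/startswith by a single character-level pass
-- that lowercases as it goes and tests the accumulated chunk at each ';' boundary (alternative, same cost).


-- ===== PORT A =====
-- the 'for chunk in …: if …: return True' loop, chunk list from style.split(";")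
def styleAChunkLoop (p : List Char) : List (List Char) → Bool
  | [] => false
  | chunk :: rest =>
      if PySem.Chars.startswith (PySem.Chars.lower (PySem.Chars.strip chunk)) p then true
      else styleAChunkLoop p rest

def style_mentions_py (style : Option String) (prop : String) : Bool :=
  match style with
  | none => false                                   -- if not style: return False
  | some s =>
      if s = "" then false                          -- if not style: return False
      else
        let p := PySem.Chars.lower prop.toList      -- prop = prop.lower()
        styleAChunkLoop p (PySem.Chars.splitOn s.toList [';'])  -- style.split(";")

-- ===== PORT B =====
-- chunk.strip().startswith(p)
def styleBHit (chunk p : List Char) : Bool :=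
  PySem.Chars.startswith (PySem.Chars.strip chunk) p

-- the 'for ch in style' loop, carrying the lowercased current chunk
def styleBLoop (p : List Char) : List Char → List Char → Bool
  | [], chunk => styleBHit chunk p
  | ch :: rest, chunk =>
      if ch = ';' then
        if styleBHit chunk p then true else styleBLoop p rest []
      else styleBLoop p rest (chunk ++ [PySem.Chars.lowerChar ch])

def style_mentions_py_alt (style : Option String) (prop : String) : Bool :=
  match style with
  | none => false
  | some s =>
      if s = "" then false
      else styleBLoop (PySem.Chars.lower prop.toList) s.toList []

-- ===== PRECONDITION & SPEC =====
def Spec_style_mentions_py (style : Option String) (prop : String) (out : Bool) : Prop := out = style_mentions_py_alt style prop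
instance (style : Option String) (prop : String) (out : Bool) : Decidable (Spec_style_mentions_py style prop out) := by unfold Spec_style_mentions_py; infer_instance

-- ===== CLAIM (what is proved, stated in full; the proofs are below) =====
def Claim_equal_style_mentions_py : Prop := ∀ (style : Option String) (prop : String), Dom_style_mentions_py style prop → Spec_style_mentions_py style prop (style_mentions_py style prop)

-- ===== LEMMAS AND PROOFS =====

-- reference structural recursion for split(";")
def styleSplitRec : List Char → List (List Char)
  | [] => [[]]
  | c :: r => if c = ';' then [] :: styleSplitRec r
              else List.modifyHead (fun h => c :: h) (styleSplitRec r)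

theorem modifyHead_id_list (L : List (List Char)) :
    List.modifyHead (fun h => h) L = L := by
  cases L <;> simp

theorem styleSplitRec_ne_nil (l : List Char) : styleSplitRec l ≠ [] := by
  cases l with
  | nil => simp [styleSplitRec]
  | cons c r =>
      simp only [styleSplitRec]
      split
      · simp
      · cases h : styleSplitRec r with
        | nil => exact absurd h (styleSplitRec_ne_nil r)
        | cons a t => simp

theorem splitOn_go_eq (fuel : Nat) (l cur : List Char) (acc : List (List Char))
    (hf : l.length < fuel) :
    PySem.Chars.splitOn.go [';'] fuel l cur acc =
      acc.reverse ++ List.modifyHead (fun h => cur.reverse ++ h) (styleSplitRec l) := by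
  induction fuel generalizing l cur acc with
  | zero => omega
  | succ fuel ih =>
      cases l with
      | nil => simp [PySem.Chars.splitOn.go, styleSplitRec]
      | cons c r =>
          by_cases hc : c = ';'
          · subst hc
            have hpre : [';'].isPrefixOf (';' :: r) = true := by simp [List.isPrefixOf]
            simp only [PySem.Chars.splitOn.go, hpre, if_pos, List.length_cons,
              List.length_nil, List.drop_succ_cons, List.drop_zero]
            rw [ih r [] ((cur.reverse) :: acc) (by simpa using Nat.lt_of_succ_lt_succ hf)]
            simp [styleSplitRec, modifyHead_id_list]
          · have hpre : [';'].isPrefixOf (c :: r) = false := by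
              simp [List.isPrefixOf]; exact fun h => hc h.symm
            simp only [PySem.Chars.splitOn.go, hpre]
            rw [if_neg (by simp)]
            rw [ih r (c :: cur) acc (by simpa using Nat.lt_of_succ_lt_succ hf)]
            obtain ⟨a, t, ht⟩ : ∃ a t, styleSplitRec r = a :: t := by
              cases h : styleSplitRec r with
              | nil => exact absurd h (styleSplitRec_ne_nil r)
              | cons a t => exact ⟨a, t, rfl⟩
            simp [styleSplitRec, hc, ht]

theorem splitOn_eq_splitRec (l : List Char) :
    PySem.Chars.splitOn l [';'] = styleSplitRec l := by
  unfold PySem.Chars.splitOn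
  rw [splitOn_go_eq (l.length + 1) l [] [] (by omega)]
  simp [modifyHead_id_list]

-- lowering does not change whether a character is whitespace
theorem isspace_lowerChar (c : Char) :
    PySem.Chars.isspace (PySem.Chars.lowerChar c) = PySem.Chars.isspace c := by
  unfold PySem.Chars.lowerChar
  by_cases h : PySem.Chars.isupper c = true
  · have hn : 65 ≤ c.toNat ∧ c.toNat ≤ 90 := by
      unfold PySem.Chars.isupper at h
      simp only [Bool.and_eq_true, decide_eq_true_eq, Char.le_def,
        UInt32.le_iff_toNat_le] at h
      exact h
    have hv : (c.toNat + 32).isValidChar := Or.inl (by omega)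
    have htn : (Char.ofNat (c.toNat + 32)).toNat = c.toNat + 32 := by
      unfold Char.ofNat
      rw [dif_pos hv]
      rfl
    simp only [h, if_true]
    unfold PySem.Chars.isspace
    rw [Bool.eq_iff_iff]
    simp only [Bool.or_eq_true, Bool.and_eq_true, decide_eq_true_eq]
    omega
  · simp [h]

theorem isspace_comp_lowerChar :
    (PySem.Chars.isspace ∘ PySem.Chars.lowerChar) = PySem.Chars.isspace :=
  funext isspace_lowerChar

theorem dropWhile_isspace_lower (m : List Char) :
    List.dropWhile PySem.Chars.isspace (List.map PySem.Chars.lowerChar m)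
      = List.map PySem.Chars.lowerChar (List.dropWhile PySem.Chars.isspace m) := by
  rw [List.dropWhile_map, isspace_comp_lowerChar]

theorem strip_lower_comm (l : List Char) :
    PySem.Chars.strip (PySem.Chars.lower l) = PySem.Chars.lower (PySem.Chars.strip l) := by
  unfold PySem.Chars.strip PySem.Chars.lstrip PySem.Chars.rstrip PySem.Chars.lower
  rw [dropWhile_isspace_lower, ← List.map_reverse, dropWhile_isspace_lower, List.map_reverse]

-- A's chunk loop is an 'any' over the chunk list
theorem styleAChunkLoop_eq_any (p : List Char) (l : List (List Char)) :
    styleAChunkLoop p l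
      = l.any (fun c => PySem.Chars.startswith (PySem.Chars.lower (PySem.Chars.strip c)) p) := by
  induction l with
  | nil => simp [styleAChunkLoop]
  | cons c t ih =>
      simp only [styleAChunkLoop, List.any_cons]
      split
      · simp [*]
      · simp [*]

-- the key loop invariant: B's character loop computes A's per-chunk 'any'
theorem styleBLoop_invariant (p : List Char) (s acc : List Char) :
    styleBLoop p s acc
      = (List.modifyHead (fun h => acc ++ h)
          ((styleSplitRec s).map PySem.Chars.lower)).any (fun c => styleBHit c p) := by
  induction s generalizing acc with
  | nil => simp [styleBLoop, styleSplitRec, PySem.Chars.lower]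
  | cons c r ih =>
      by_cases hc : c = ';'
      · subst hc
        simp only [styleBLoop, styleSplitRec]
        rw [ih []]
        cases h : styleSplitRec r with
        | nil => exact absurd h (styleSplitRec_ne_nil r)
        | cons a t => simp [PySem.Chars.lower]
      · obtain ⟨a, t, ht⟩ : ∃ a t, styleSplitRec r = a :: t := by
          cases h : styleSplitRec r with
          | nil => exact absurd h (styleSplitRec_ne_nil r)
          | cons a t => exact ⟨a, t, rfl⟩
        simp only [styleBLoop, if_neg hc, styleSplitRec, ht,
          List.modifyHead_cons, List.map_cons, List.any_cons]
        rw [ih (acc ++ [PySem.Chars.lowerChar c])]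
        simp [ht, PySem.Chars.lower]

-- ===== VERDICT (by name: the statement is the Claim_ definition above) =====
theorem style_mentions_py_spec : Claim_equal_style_mentions_py := by
  intro style prop _
  unfold Spec_style_mentions_py
  cases style with
  | none => rfl
  | some s =>
      unfold style_mentions_py style_mentions_py_alt
      by_cases hs : s = ""
      · simp [hs]
      · simp only [hs, if_false]
        rw [splitOn_eq_splitRec, styleAChunkLoop_eq_any, styleBLoop_invariant]
        cases h : styleSplitRec s.toList with
        | nil => exact absurd h (styleSplitRec_ne_nil s.toList)
        | cons a t =>
            simp only [List.map_cons, List.modifyHead_cons, List.nil_append, List.any_cons]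
            congr 1
            · unfold styleBHit
              rw [strip_lower_comm]
            · rw [List.any_map]
              congr 1
              funext c
              unfold styleBHit
              simp only [Function.comp_apply]
              rw [strip_lower_comm]
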